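-- pv_equiv track=rewrite | github.com/Mshkss/Study | Python/Python Basics/SFU-Practical/p6/4.py | possible_numbers
-- ===== SOURCE A (Python) =====
-- def possible_numbers(n, questions_answers):
--     possible = set(range(1, n + 1))  # Множество всех возможных чисел
--
--     for question, answer in questions_answers:
--         if answer == "YES":
--             # Убираем из возможных чисел все, что не в вопросе
--             possible.intersection_update(set(question))
--         elif answer == "NO":
--             # Убираем из возможных чисел все, что в вопросе
--             possible.difference_update(set(question))
--
--     return sorted(possible)  # Возвращаем отсортированный список возможных чисел
-- ===== SOURCE B (Python) =====
-- def possible_numbers(n, questions_answers):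
--     yes_sets = [set(q) for q, a in questions_answers if a == "YES"]
--     no_sets = [set(q) for q, a in questions_answers if a == "NO"]
--     return [x for x in range(1, n + 1)
--             if all(x in s for s in yes_sets) and all(x not in s for s in no_sets)]
-- ===== Notes on version B (the rewrite author's own statement) =====
-- stated objective: alternative
-- what changed: Instead of shrinking a set of candidates by per-question intersection/difference updates and sorting at the end, B partitions the questions into yes-sets and no-sets once and builds the answer directly as an ascending comprehension over range(1, n+1), keeping x iff it lies in every yes-set and no no-set; no final sort is needed.
import Mathlib
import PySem

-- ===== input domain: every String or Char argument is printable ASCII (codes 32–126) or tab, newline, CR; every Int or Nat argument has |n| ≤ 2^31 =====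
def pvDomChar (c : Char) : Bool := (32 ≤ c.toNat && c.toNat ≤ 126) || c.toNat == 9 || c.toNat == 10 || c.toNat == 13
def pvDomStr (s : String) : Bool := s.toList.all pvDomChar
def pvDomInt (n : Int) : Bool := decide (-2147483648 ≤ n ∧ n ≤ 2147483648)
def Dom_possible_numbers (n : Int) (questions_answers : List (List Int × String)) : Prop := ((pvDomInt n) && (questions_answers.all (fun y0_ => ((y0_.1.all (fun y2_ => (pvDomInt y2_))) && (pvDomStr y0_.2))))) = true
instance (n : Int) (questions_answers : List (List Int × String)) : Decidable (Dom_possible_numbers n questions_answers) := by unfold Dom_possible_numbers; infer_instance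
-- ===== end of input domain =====

-- B builds the ascending result directly, testing each candidate 1..n against precomputed
-- yes/no sets, instead of A's per-question set intersection/difference updates plus final sort.

-- ===== PORT A =====
def possible_numbers (n : Int) (questions_answers : List (List Int × String)) : List Int :=
  let possible : PySem.Set Int := PySem.Set.ofList (PySem.List.pyRange 1 (n + 1) 1)
  let possible := questions_answers.foldl (fun possible qa =>
    if qa.2 == "YES" then PySem.Set.inter possible (PySem.Set.ofList qa.1)
    else if qa.2 == "NO" then PySem.Set.diff possible (PySem.Set.ofList qa.1)
    else possible) possible
  PySem.List.sorted possible (fun x => x) false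

-- ===== PORT B =====
def possible_numbers_alt (n : Int) (questions_answers : List (List Int × String)) : List Int :=
  let yesSets := (questions_answers.filter (fun p => p.2 == "YES")).map
    (fun p => PySem.Set.ofList p.1)
  let noSets := (questions_answers.filter (fun p => p.2 == "NO")).map
    (fun p => PySem.Set.ofList p.1)
  (PySem.List.pyRange 1 (n + 1) 1).filter (fun x =>
    yesSets.all (fun s => PySem.Set.contains s x) &&
    noSets.all (fun s => !PySem.Set.contains s x))

-- ===== PRECONDITION & SPEC =====
def Spec_possible_numbers (n : Int) (questions_answers : List (List Int × String)) (out : List Int) : Prop := out = possible_numbers_alt n questions_answers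
instance (n : Int) (questions_answers : List (List Int × String)) (out : List Int) : Decidable (Spec_possible_numbers n questions_answers out) := by unfold Spec_possible_numbers; infer_instance

-- ===== CLAIM (what is proved, stated in full; the proofs are below) =====
def Claim_equal_possible_numbers : Prop := ∀ (n : Int) (questions_answers : List (List Int × String)), Dom_possible_numbers n questions_answers → Spec_possible_numbers n questions_answers (possible_numbers n questions_answers)

-- ===== LEMMAS AND PROOFS =====

-- the per-candidate predicate that one question imposes
def pvCond (p : List Int × String) (x : Int) : Bool :=
  if p.2 == "YES" then PySem.Set.contains (PySem.Set.ofList p.1) x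
  else if p.2 == "NO" then !PySem.Set.contains (PySem.Set.ofList p.1) x
  else true

-- A's fold of intersection/difference updates is one filter by the conjunction of all conditions
theorem pv_foldl_eq_filter (qas : List (List Int × String)) (L : List Int) :
    qas.foldl (fun possible qa =>
      if qa.2 == "YES" then PySem.Set.inter possible (PySem.Set.ofList qa.1)
      else if qa.2 == "NO" then PySem.Set.diff possible (PySem.Set.ofList qa.1)
      else possible) L = L.filter (fun x => qas.all (fun p => pvCond p x)) := by
  induction qas generalizing L with
  | nil => simp
  | cons p rest ih =>
    rw [List.foldl_cons, ih]
    by_cases h1 : p.2 = "YES"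
    · simp [h1, pvCond, PySem.Set.inter, List.filter_filter, Bool.and_comm]
    · by_cases h2 : p.2 = "NO"
      · simp [h2, pvCond, PySem.Set.diff, List.filter_filter, Bool.and_comm]
      · simp [h1, h2, pvCond]

-- B's split per-candidate predicate is the same conjunction
theorem pv_pred_eq (qas : List (List Int × String)) (x : Int) :
    (((qas.filter (fun p => p.2 == "YES")).map (fun p => PySem.Set.ofList p.1)).all
        (fun s => PySem.Set.contains s x) &&
      ((qas.filter (fun p => p.2 == "NO")).map (fun p => PySem.Set.ofList p.1)).all
        (fun s => !PySem.Set.contains s x)) = qas.all (fun p => pvCond p x) := by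
  induction qas with
  | nil => rfl
  | cons p rest ih =>
    rw [List.all_cons, ← ih]
    by_cases h1 : p.2 = "YES"
    · simp [h1, pvCond, Bool.and_comm, Bool.and_left_comm]
    · by_cases h2 : p.2 = "NO"
      · simp [h2, pvCond, Bool.and_comm, Bool.and_assoc]
      · simp [h1, h2, pvCond]

-- ===== VERDICT (by name: the statement is the Claim_ definition above) =====
theorem possible_numbers_spec : Claim_equal_possible_numbers := by
  intro n qas _
  show possible_numbers n qas = possible_numbers_alt n qas
  simp only [possible_numbers, possible_numbers_alt]
  have hnd : (PySem.List.pyRange 1 (n + 1) 1).Nodup := PySem.List.nodup_pyRange_one 1 (n + 1)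
  rw [PySem.Set.ofList_eq_self_of_nodup _ hnd, pv_foldl_eq_filter]
  have hlt : ((PySem.List.pyRange 1 (n + 1) 1).filter
      (fun x => qas.all (fun p => pvCond p x))).Pairwise (· < ·) :=
    (PySem.List.pairwise_lt_pyRange_one 1 (n + 1)).filter _
  have hs : PySem.List.sorted ((PySem.List.pyRange 1 (n + 1) 1).filter
        (fun x => qas.all (fun p => pvCond p x))) (fun x => x) false
      = (PySem.List.pyRange 1 (n + 1) 1).filter (fun x => qas.all (fun p => pvCond p x)) :=
    PySem.List.sorted_eq_self_of_pairwise _ _ (hlt.imp le_of_lt)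
  rw [hs, List.filter_congr (fun x _ => (pv_pred_eq qas x).symm)]
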